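-- pv_equiv track=rewrite | github.com/zhyliu-devon/organoid_map3d | electrophysiology_mapping/spike.py | find_largest_plateau_with_peaks
-- ===== SOURCE A (Python) =====
-- def find_largest_plateau_with_peaks(change_in_peaks, peak_counts):
--     """
--     Identify the largest plateau where actual peaks are detected.
--
--     Parameters:
--     - change_in_peaks: The change in the number of detected peaks across thresholds.
--     - peak_counts: The number of peaks detected at each threshold.
--
--     Returns:
--     - start_index: The start index of the largest plateau.
--     - end_index: The end index of the largest plateau.
--     """
--     plateaus = []
--     start_index = 0
--     for i in range(1, len(change_in_peaks)):
--         if change_in_peaks[i] != change_in_peaks[i - 1] or peak_counts[i] == 0: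
--             if start_index < i - 1:
--                 plateaus.append((start_index, i - 1, i - 1 - start_index))
--             start_index = i
--     # Include the last plateau
--     if start_index < len(change_in_peaks) - 1 and peak_counts[-1] != 0:
--         plateaus.append((start_index, len(change_in_peaks) - 1, len(change_in_peaks) - 1 - start_index))
--
--     # Sort plateaus by size (width) and then by starting index to find the largest, earliest plateau
--     plateaus.sort(key=lambda x: (x[2], x[0]), reverse=True)
--
--     if plateaus:
--         largest_plateau = plateaus[0]
--         return largest_plateau[0], largest_plateau[1]
--     else:
--         return 0, 0  # Default to the first threshold if no plateaus are found
-- ===== SOURCE B (Python) =====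
-- def find_largest_plateau_with_peaks(change_in_peaks, peak_counts):
--     # Segment-jumping two-level scan: the inner loop advances j to the end of the
--     # current plateau, the outer loop compares that whole segment against the single
--     # best plateau kept so far (max width, ties broken to the latest start).
--     # No plateau list is built and nothing is sorted.
--     n = len(change_in_peaks)
--     best_width, best_start, best_end = 0, 0, 0
--     i = 0
--     while i < n:
--         j = i
--         while j + 1 < n and change_in_peaks[j + 1] == change_in_peaks[j] and peak_counts[j + 1] != 0:
--             j += 1
--         if i < j and (j < n - 1 or peak_counts[-1] != 0) and j - i >= best_width:
--             best_width, best_start, best_end = j - i, i, j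
--         i = j + 1
--     return best_start, best_end
-- ===== Notes on version B (the rewrite author's own statement) =====
-- stated objective: alternative
-- what changed: Instead of a single index loop that collects every plateau into a list and then sorts it by (width, start) descending to take the first, B uses a segment-jumping two-level scan: an inner loop advances directly to the end of the current plateau and the outer loop compares that whole segment against the single best plateau kept so far (max width, ties to the latest start), so no plateau list is built and nothing is sorted.
import Mathlib
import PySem

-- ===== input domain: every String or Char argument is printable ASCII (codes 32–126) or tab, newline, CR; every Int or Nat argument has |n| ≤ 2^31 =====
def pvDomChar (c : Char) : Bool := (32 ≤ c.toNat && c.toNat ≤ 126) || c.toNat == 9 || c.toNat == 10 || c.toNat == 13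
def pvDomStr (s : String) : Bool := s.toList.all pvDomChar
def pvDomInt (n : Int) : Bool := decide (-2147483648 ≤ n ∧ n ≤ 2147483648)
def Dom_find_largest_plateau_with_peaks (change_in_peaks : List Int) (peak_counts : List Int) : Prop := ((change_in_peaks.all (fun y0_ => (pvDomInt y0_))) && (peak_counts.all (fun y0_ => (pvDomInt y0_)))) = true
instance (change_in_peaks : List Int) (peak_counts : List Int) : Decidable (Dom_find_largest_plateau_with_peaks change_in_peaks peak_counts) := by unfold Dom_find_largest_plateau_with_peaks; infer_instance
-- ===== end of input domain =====

-- B replaces A's collect-all-plateaus-then-sort with a segment-jumping two-level scan: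
-- the inner loop jumps to the end of the current plateau, the outer loop keeps the single best.

-- ===== PORT A =====
def find_largest_plateau_with_peaks (change_in_peaks : List Int) (peak_counts : List Int) : Int × Int :=
  let n : Int := change_in_peaks.length
  let st := (PySem.List.pyRange 1 n 1).foldl
    (fun (s : List (Int × Int × Int) × Int) i =>
      if PySem.List.pyGetD change_in_peaks i 0 ≠ PySem.List.pyGetD change_in_peaks (i - 1) 0
          ∨ PySem.List.pyGetD peak_counts i 0 = 0 then
        ((if s.2 < i - 1 then s.1 ++ [(s.2, i - 1, i - 1 - s.2)] else s.1), i)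
      else s) ([], 0)
  let plateaus :=
    if st.2 < n - 1 ∧ PySem.List.pyGetD peak_counts (-1) 0 ≠ 0 then
      st.1 ++ [(st.2, n - 1, n - 1 - st.2)]
    else st.1
  match PySem.List.sorted2 plateaus (fun x => x.2.2) (fun x => x.1) true with
  | p :: _ => (p.1, p.2.1)
  | [] => (0, 0)

-- ===== PORT B =====
-- inner `while` of Source B: advance j to the end of the plateau containing j
def pvAdv (c pc : List Int) (n j : Int) : Int :=
  if h : j + 1 < n ∧ PySem.List.pyGetD c (j + 1) 0 = PySem.List.pyGetD c j 0
      ∧ PySem.List.pyGetD pc (j + 1) 0 ≠ 0 then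
    pvAdv c pc n (j + 1)
  else j
termination_by (n - j).toNat
decreasing_by omega

-- needed for pvLoop's termination (the outer while's index strictly increases)
lemma pvAdv_ge (c pc : List Int) (n : Int) : ∀ (k : Nat) (t : Int), (n - t).toNat = k → t ≤ pvAdv c pc n t := by
  intro k
  induction k using Nat.strong_induction_on with
  | _ k ih =>
    intro t hk
    rw [pvAdv]
    split
    · rename_i h
      have := ih (n - (t + 1)).toNat (by omega) (t + 1) rfl
      omega
    · exact le_refl t

-- outer `while` of Source B: jump segment by segment, keeping best = (width, start, end)
def pvLoop (c pc : List Int) (n i : Int) (best : Int × Int × Int) : Int × Int × Int :=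
  if _h : i < n then
    let j := pvAdv c pc n i
    pvLoop c pc n (j + 1)
      (if i < j ∧ (j < n - 1 ∨ PySem.List.pyGetD pc (-1) 0 ≠ 0) ∧ j - i ≥ best.1 then
        (j - i, i, j)
      else best)
  else best
termination_by (n - i).toNat
decreasing_by
  have := pvAdv_ge c pc n (n - i).toNat i rfl
  omega

def find_largest_plateau_with_peaks_alt (change_in_peaks : List Int) (peak_counts : List Int) : Int × Int :=
  let n : Int := change_in_peaks.length
  let b := pvLoop change_in_peaks peak_counts n 0 (0, 0, 0)
  (b.2.1, b.2.2)

-- ===== PRECONDITION & SPEC =====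
-- Pre_ excludes exactly the inputs on which the Python A raises IndexError: whenever two
-- consecutive entries of change_in_peaks are equal at position i, peak_counts[i] is read.
def Pre_find_largest_plateau_with_peaks (change_in_peaks : List Int) (peak_counts : List Int) : Prop :=
  ∀ i ∈ List.range change_in_peaks.length,
    (0 < i ∧ change_in_peaks.getD i 0 = change_in_peaks.getD (i - 1) 0) → i < peak_counts.length
instance (change_in_peaks : List Int) (peak_counts : List Int) : Decidable (Pre_find_largest_plateau_with_peaks change_in_peaks peak_counts) := by unfold Pre_find_largest_plateau_with_peaks; infer_instance

def pvWitness_find_largest_plateau_with_peaks : List Int × List Int := ([1, 1, 1, 2, 2], [3, 3, 3, 3, 3])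

def Spec_find_largest_plateau_with_peaks (change_in_peaks : List Int) (peak_counts : List Int) (out : Int × Int) : Prop := out = find_largest_plateau_with_peaks_alt change_in_peaks peak_counts
instance (change_in_peaks : List Int) (peak_counts : List Int) (out : Int × Int) : Decidable (Spec_find_largest_plateau_with_peaks change_in_peaks peak_counts out) := by unfold Spec_find_largest_plateau_with_peaks; infer_instance

-- ===== CLAIM (what is proved, stated in full; the proofs are below) =====
def Claim_equal_find_largest_plateau_with_peaks : Prop := ∀ (change_in_peaks : List Int) (peak_counts : List Int), Dom_find_largest_plateau_with_peaks change_in_peaks peak_counts → Pre_find_largest_plateau_with_peaks change_in_peaks peak_counts → Spec_find_largest_plateau_with_peaks change_in_peaks peak_counts (find_largest_plateau_with_peaks change_in_peaks peak_counts)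

-- ===== LEMMAS AND PROOFS =====

-- more facts about pvAdv: it stays below n, and it stops at a break position
lemma pvAdv_lt (c pc : List Int) (n : Int) : ∀ (k : Nat) (t : Int), (n - t).toNat = k → t < n → pvAdv c pc n t < n := by
  intro k
  induction k using Nat.strong_induction_on with
  | _ k ih =>
    intro t hk ht
    rw [pvAdv]
    split
    · rename_i h
      exact ih (n - (t + 1)).toNat (by omega) (t + 1) rfl h.1
    · exact ht

lemma pvAdv_stop (c pc : List Int) (n : Int) : ∀ (k : Nat) (t : Int), (n - t).toNat = k →
    ¬ (pvAdv c pc n t + 1 < n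
        ∧ PySem.List.pyGetD c (pvAdv c pc n t + 1) 0 = PySem.List.pyGetD c (pvAdv c pc n t) 0
        ∧ PySem.List.pyGetD pc (pvAdv c pc n t + 1) 0 ≠ 0) := by
  intro k
  induction k using Nat.strong_induction_on with
  | _ k ih =>
    intro t hk
    rw [pvAdv]
    split
    · rename_i h
      exact ih (n - (t + 1)).toNat (by omega) (t + 1) rfl
    · rename_i h
      exact h

-- The comparison sorted2 uses with reverse=True: `pvBefore x m` means x goes strictly
-- before m in the descending order, i.e. (width, start) of x is lexicographically greater.
def pvBefore (a b : Int × Int × Int) : Bool :=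
  decide (b.2.2 < a.2.2) || (!decide (a.2.2 < b.2.2) && decide (b.1 < a.1))

def pvComb (h : Option (Int × Int × Int)) (p : Int × Int × Int) : Option (Int × Int × Int) :=
  some (h.elim p (fun m => if pvBefore p m then p else m))

def pvSel (ps : List (Int × Int × Int)) : Option (Int × Int × Int) := ps.foldl pvComb none

lemma head?_insertBy {α : Type} (before : α → α → Bool) (x : α) (acc : List α) :
    (PySem.List.insertBy before x acc).head? =
      some (acc.head?.elim x (fun y => if before x y then x else y)) := by
  cases acc with
  | nil => simp [PySem.List.insertBy]
  | cons y ys => cases hxy : before x y <;> simp [PySem.List.insertBy, hxy]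

lemma head?_foldl_insertBy {α : Type} (before : α → α → Bool) (xs : List α) (acc : List α) :
    (xs.foldl (fun a x => PySem.List.insertBy before x a) acc).head? =
      xs.foldl (fun h x => some (h.elim x (fun m => if before x m then x else m))) acc.head? := by
  induction xs generalizing acc with
  | nil => rfl
  | cons x xs ih =>
    simp only [List.foldl_cons]
    rw [ih, head?_insertBy]

lemma head?_sorted2_rev (ps : List (Int × Int × Int)) :
    (PySem.List.sorted2 ps (fun x => x.2.2) (fun x => x.1) true).head? = pvSel ps := by
  rw [show PySem.List.sorted2 ps (fun x => x.2.2) (fun x => x.1) true =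
      ps.foldl (fun acc x => PySem.List.insertBy pvBefore x acc) [] from rfl]
  rw [head?_foldl_insertBy]
  rfl

lemma pvComb_some (m p : Int × Int × Int) (h : m.1 < p.1) :
    pvComb (some m) p = some (if m.2.2 ≤ p.2.2 then p else m) := by
  have hb : pvBefore p m = decide (m.2.2 ≤ p.2.2) := by
    by_cases hw : m.2.2 ≤ p.2.2
    · by_cases hlt : m.2.2 < p.2.2
      · simp [pvBefore, hlt, hw]
      · have he : ¬ p.2.2 < m.2.2 := by omega
        simp [pvBefore, hlt, he, h, hw]
    · have h1 : ¬ m.2.2 < p.2.2 := by omega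
      have h2 : p.2.2 < m.2.2 := by omega
      simp [pvBefore, h1, h2, hw]
  simp [pvComb, hb]

lemma pvSel_append (ps : List (Int × Int × Int)) (p : Int × Int × Int) :
    pvSel (ps ++ [p]) = pvComb (pvSel ps) p := by
  simp [pvSel, List.foldl_append]

-- A's loop body as a named step function
def pvStepA (c pc : List Int) (s : List (Int × Int × Int) × Int) (i : Int) : List (Int × Int × Int) × Int :=
  if PySem.List.pyGetD c i 0 ≠ PySem.List.pyGetD c (i - 1) 0 ∨ PySem.List.pyGetD pc i 0 = 0 then
    ((if s.2 < i - 1 then s.1 ++ [(s.2, i - 1, i - 1 - s.2)] else s.1), i)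
  else s

-- proof-side index-by-index version of B's best-so-far update (best = (width, start, end))
def pvStepB (c pc : List Int) (s : (Int × Int × Int) × Int) (i : Int) : (Int × Int × Int) × Int :=
  if PySem.List.pyGetD c i 0 ≠ PySem.List.pyGetD c (i - 1) 0 ∨ PySem.List.pyGetD pc i 0 = 0 then
    ((if s.2 < i - 1 ∧ i - 1 - s.2 ≥ s.1.1 then (i - 1 - s.2, s.2, i - 1) else s.1), i)
  else s

-- B's best triple (width, start, end) as an A-side plateau triple (start, end, width)
def pvImg (b : Int × Int × Int) : Int × Int × Int := (b.2.1, b.2.2, b.1)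

-- the final clause of the index-by-index formulation (mirrors A's last-plateau clause)
def pvFin (pc : List Int) (n : Int) (st : (Int × Int × Int) × Int) : Int × Int × Int :=
  if st.2 < n - 1 ∧ PySem.List.pyGetD pc (-1) 0 ≠ 0 ∧ n - 1 - st.2 ≥ st.1.1 then
    (n - 1 - st.2, st.2, n - 1)
  else st.1

-- B's inner while jumps over exactly the indices on which pvStepB is the identity
lemma pv_adv_fold (c pc : List Int) (n : Int) : ∀ (k : Nat) (t : Int) (sb : (Int × Int × Int) × Int),
    (n - t).toNat = k → t < n →
    (PySem.List.pyRange (t + 1) n 1).foldl (pvStepB c pc) sb =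
      (if pvAdv c pc n t + 1 < n then
        (PySem.List.pyRange (pvAdv c pc n t + 2) n 1).foldl (pvStepB c pc)
          (pvStepB c pc sb (pvAdv c pc n t + 1))
      else sb) := by
  intro k
  induction k using Nat.strong_induction_on with
  | _ k ih =>
    intro t sb hk ht
    by_cases hext : t + 1 < n ∧ PySem.List.pyGetD c (t + 1) 0 = PySem.List.pyGetD c t 0
        ∧ PySem.List.pyGetD pc (t + 1) 0 ≠ 0
    · have hadv : pvAdv c pc n t = pvAdv c pc n (t + 1) := by rw [pvAdv, dif_pos hext]
      rw [PySem.List.pyRange_one_cons (by omega : t + 1 < n)]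
      simp only [List.foldl_cons]
      have hstep : pvStepB c pc sb (t + 1) = sb := by
        unfold pvStepB
        rw [if_neg]
        rintro (hne | hz)
        · exact hne (by rw [show (t : Int) + 1 - 1 = t by ring]; exact hext.2.1)
        · exact hext.2.2 hz
      rw [hstep, hadv]
      exact ih (n - (t + 1)).toNat (by omega) (t + 1) sb rfl hext.1
    · have hadv : pvAdv c pc n t = t := by rw [pvAdv, dif_neg hext]
      rw [hadv]
      by_cases h1 : t + 1 < n
      · rw [if_pos h1, PySem.List.pyRange_one_cons h1]
        simp only [List.foldl_cons]
        rw [show t + 1 + 1 = t + 2 by ring]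
      · rw [if_neg h1, PySem.List.pyRange_one_eq_nil (by omega : n ≤ t + 1)]
        rfl

-- the segment-jumping pvLoop computes pvFin of the index-by-index fold
lemma pv_loop_eq_fold (c pc : List Int) (n : Int) : ∀ (k : Nat) (s : Int) (b : Int × Int × Int),
    (n - s).toNat = k →
    pvFin pc n ((PySem.List.pyRange (s + 1) n 1).foldl (pvStepB c pc) (b, s)) =
      pvLoop c pc n s b := by
  intro k
  induction k using Nat.strong_induction_on with
  | _ k ih =>
    intro s b hk
    by_cases hsn : s < n
    · have hge := pvAdv_ge c pc n (n - s).toNat s rfl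
      have hjn := pvAdv_lt c pc n (n - s).toNat s rfl hsn
      have hstop := pvAdv_stop c pc n (n - s).toNat s rfl
      set j := pvAdv c pc n s with hj
      rw [pv_adv_fold c pc n (n - s).toNat s (b, s) rfl hsn]
      rw [pvLoop, dif_pos hsn]
      dsimp only
      rw [← hj]
      by_cases h1 : j + 1 < n
      · rw [if_pos h1]
        have hbreak : PySem.List.pyGetD c (j + 1) 0 ≠ PySem.List.pyGetD c ((j + 1) - 1) 0
            ∨ PySem.List.pyGetD pc (j + 1) 0 = 0 := by
          rw [show (j + 1) - 1 = j by ring]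
          by_cases hc1 : PySem.List.pyGetD c (j + 1) 0 = PySem.List.pyGetD c j 0
          · right
            by_contra hc2
            exact hstop ⟨h1, hc1, hc2⟩
          · exact Or.inl hc1
        have hstep : pvStepB c pc (b, s) (j + 1) =
            ((if s < j ∧ j - s ≥ b.1 then (j - s, s, j) else b), j + 1) := by
          unfold pvStepB
          rw [if_pos hbreak]
          dsimp only
          rw [show j + 1 - 1 = j by ring]
        rw [hstep]
        have hcond : (s < j ∧ (j < n - 1 ∨ PySem.List.pyGetD pc (-1) 0 ≠ 0) ∧ j - s ≥ b.1)
            ↔ (s < j ∧ j - s ≥ b.1) := by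
          constructor
          · rintro ⟨u1, -, u3⟩; exact ⟨u1, u3⟩
          · rintro ⟨u1, u3⟩; exact ⟨u1, Or.inl (by omega), u3⟩
        rw [if_congr hcond rfl rfl]
        have hrec := ih (n - (j + 1)).toNat (by omega) (j + 1)
          (if s < j ∧ j - s ≥ b.1 then (j - s, s, j) else b) rfl
        rw [show j + 1 + 1 = j + 2 by ring] at hrec
        exact hrec
      · rw [if_neg h1]
        have hje : j = n - 1 := by omega
        rw [pvLoop, dif_neg (by omega : ¬ j + 1 < n)]
        unfold pvFin
        dsimp only
        have hcond : (s < n - 1 ∧ PySem.List.pyGetD pc (-1) 0 ≠ 0 ∧ n - 1 - s ≥ b.1)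
            ↔ (s < j ∧ (j < n - 1 ∨ PySem.List.pyGetD pc (-1) 0 ≠ 0) ∧ j - s ≥ b.1) := by
          constructor
          · rintro ⟨u1, u2, u3⟩; exact ⟨by omega, Or.inr u2, by omega⟩
          · rintro ⟨u1, u2, u3⟩
            refine ⟨by omega, ?_, by omega⟩
            rcases u2 with u2 | u2
            · omega
            · exact u2
        have hthen : ((n : Int) - 1 - s, s, n - 1) = (j - s, s, j) := by rw [hje]
        rw [if_congr hcond hthen rfl]
    · rw [PySem.List.pyRange_one_eq_nil (by omega : n ≤ s + 1)]
      rw [pvLoop, dif_neg hsn]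
      simp only [List.foldl_nil]
      unfold pvFin
      rw [if_neg (by dsimp only; omega)]

-- the loop invariant relating A's state (plateaus, start) to the best-so-far state
def pvInv (sa : List (Int × Int × Int) × Int) (sb : (Int × Int × Int) × Int) (bound : Int) : Prop :=
  sa.2 = sb.2 ∧ sa.2 < bound ∧
    ((sb.1 = (0, 0, 0) ∧ sa.1 = []) ∨
      (pvSel sa.1 = some (pvImg sb.1) ∧ 1 ≤ sb.1.1 ∧ sb.1.2.1 < sa.2))

lemma pv_step (c pc : List Int) (i : Int) (la : List (Int × Int × Int)) (bb : Int × Int × Int)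
    (ta : Int) (h : pvInv (la, ta) (bb, ta) i) :
    pvInv (pvStepA c pc (la, ta) i) (pvStepB c pc (bb, ta) i) (i + 1) := by
  obtain ⟨-, h2, h3⟩ := h
  dsimp only at h2 h3
  unfold pvStepA pvStepB
  dsimp only
  by_cases hc : PySem.List.pyGetD c i 0 ≠ PySem.List.pyGetD c (i - 1) 0 ∨ PySem.List.pyGetD pc i 0 = 0
  · simp only [if_pos hc]
    by_cases hlt : ta < i - 1
    · rcases h3 with ⟨hb, ha⟩ | ⟨hsel, hw, hs⟩
      · have hcB : ta < i - 1 ∧ i - 1 - ta ≥ bb.1 := ⟨hlt, by rw [hb]; dsimp only; omega⟩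
        rw [if_pos hlt, if_pos hcB, ha]
        refine ⟨rfl, by omega, Or.inr ⟨rfl, by dsimp only; omega, by dsimp only; omega⟩⟩
      · have hs' : (pvImg bb).1 < (ta, i - 1, i - 1 - ta).1 := hs
        have hcomb := pvComb_some (pvImg bb) (ta, i - 1, i - 1 - ta) hs'
        by_cases hge : i - 1 - ta ≥ bb.1
        · rw [if_pos hlt, if_pos (⟨hlt, hge⟩ : ta < i - 1 ∧ i - 1 - ta ≥ bb.1)]
          refine ⟨rfl, by omega, Or.inr ⟨?_, by dsimp only; omega, by dsimp only; omega⟩⟩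
          rw [pvSel_append, hsel, hcomb, if_pos (show (pvImg bb).2.2 ≤ (ta, i - 1, i - 1 - ta).2.2 from hge)]
          rfl
        · rw [if_pos hlt, if_neg (show ¬ (ta < i - 1 ∧ i - 1 - ta ≥ bb.1) from fun hh => hge hh.2)]
          refine ⟨rfl, by omega, Or.inr ⟨?_, hw, by dsimp only; omega⟩⟩
          rw [pvSel_append, hsel, hcomb, if_neg (show ¬ (pvImg bb).2.2 ≤ (ta, i - 1, i - 1 - ta).2.2 from hge)]
    · rw [if_neg hlt, if_neg (show ¬ (ta < i - 1 ∧ i - 1 - ta ≥ bb.1) from fun hh => hlt hh.1)]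
      refine ⟨rfl, by omega, ?_⟩
      rcases h3 with h3 | ⟨hsel, hw, hs⟩
      · exact Or.inl h3
      · exact Or.inr ⟨hsel, hw, by dsimp only; omega⟩
  · simp only [if_neg hc]
    exact ⟨rfl, by omega, h3⟩

lemma pv_loop_inv (c pc : List Int) (n : Int) (k : Nat) :
    ∀ (a : Int) (sa : List (Int × Int × Int) × Int) (sb : (Int × Int × Int) × Int),
      (n - a).toNat = k → pvInv sa sb a →
      pvInv ((PySem.List.pyRange a n 1).foldl (pvStepA c pc) sa)
            ((PySem.List.pyRange a n 1).foldl (pvStepB c pc) sb) (max a n) := by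
  induction k with
  | zero =>
    intro a sa sb hk hinv
    have hna : n ≤ a := by omega
    rw [PySem.List.pyRange_one_eq_nil hna]
    simp only [List.foldl_nil]
    obtain ⟨h1, h2, h3⟩ := hinv
    rw [max_eq_left hna]
    exact ⟨h1, h2, h3⟩
  | succ k ih =>
    intro a sa sb hk hinv
    have han : a < n := by omega
    rw [PySem.List.pyRange_one_cons han]
    simp only [List.foldl_cons]
    obtain ⟨la, ta⟩ := sa
    obtain ⟨bb, tb⟩ := sb
    have h1 : ta = tb := hinv.1
    subst h1
    have h := ih (a + 1) (pvStepA c pc (la, ta) a) (pvStepB c pc (bb, ta) a) (by omega)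
      (pv_step c pc a la bb ta hinv)
    obtain ⟨g1, g2, g3⟩ := h
    rw [max_eq_right han.le]
    rw [max_eq_right (by omega : a + 1 ≤ n)] at g2
    exact ⟨g1, g2, g3⟩

-- ===== VERDICT (by name: the statement is the Claim_ definition above) =====
theorem find_largest_plateau_with_peaks_spec : Claim_equal_find_largest_plateau_with_peaks := by
  intro c pc _hDom _hPre
  unfold Spec_find_largest_plateau_with_peaks
  unfold find_largest_plateau_with_peaks find_largest_plateau_with_peaks_alt
  simp only []
  rw [show (fun (s : List (Int × Int × Int) × Int) (i : Int) =>
      if PySem.List.pyGetD c i 0 ≠ PySem.List.pyGetD c (i - 1) 0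
          ∨ PySem.List.pyGetD pc i 0 = 0 then
        ((if s.2 < i - 1 then s.1 ++ [(s.2, i - 1, i - 1 - s.2)] else s.1), i)
      else s) = pvStepA c pc from rfl]
  rw [← pv_loop_eq_fold c pc (c.length : Int) ((c.length : Int) - 0).toNat 0 (0, 0, 0) rfl]
  rw [show (0 : Int) + 1 = 1 from rfl]
  have hloop := pv_loop_inv c pc (c.length : Int) ((c.length : Int) - 1).toNat 1
    ([], 0) ((0, 0, 0), 0) rfl ⟨rfl, by norm_num, Or.inl ⟨rfl, rfl⟩⟩
  set sa := (PySem.List.pyRange 1 (c.length : Int) 1).foldl (pvStepA c pc) ([], 0) with hsa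
  set sb := (PySem.List.pyRange 1 (c.length : Int) 1).foldl (pvStepB c pc) ((0, 0, 0), 0) with hsb
  obtain ⟨h1, _h2, h3⟩ := hloop
  -- relate the final (post-append) plateau list on A's side to pvFin of the fold on B's side
  have hfin :
      ∀ fin b, fin = (if sa.2 < (c.length : Int) - 1 ∧ PySem.List.pyGetD pc (-1) 0 ≠ 0 then
            sa.1 ++ [(sa.2, (c.length : Int) - 1, (c.length : Int) - 1 - sa.2)] else sa.1) →
        b = pvFin pc (c.length : Int) sb →
        (b = (0, 0, 0) ∧ fin = []) ∨ pvSel fin = some (pvImg b) := by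
    intro fin b hf hb
    unfold pvFin at hb
    rw [← h1] at hb
    by_cases hc : sa.2 < (c.length : Int) - 1 ∧ PySem.List.pyGetD pc (-1) 0 ≠ 0
    · rw [if_pos hc] at hf
      rcases h3 with ⟨hb0, ha0⟩ | ⟨hsel, _hw, hs⟩
      · rw [ha0] at hf
        rw [if_pos ⟨hc.1, hc.2, by rw [hb0]; dsimp only; omega⟩] at hb
        right; rw [hf, hb]; rfl
      · have hs' : (pvImg sb.1).1 < (sa.2, (c.length : Int) - 1, (c.length : Int) - 1 - sa.2).1 := hs
        have hcomb := pvComb_some (pvImg sb.1) (sa.2, (c.length : Int) - 1, (c.length : Int) - 1 - sa.2) hs'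
        right
        rw [hf, pvSel_append, hsel, hcomb]
        by_cases hge : (pvImg sb.1).2.2 ≤ (c.length : Int) - 1 - sa.2
        · rw [if_pos hge, hb, if_pos ⟨hc.1, hc.2, hge⟩]
          rfl
        · rw [if_neg hge, hb, if_neg (fun h => hge h.2.2)]
    · rw [if_neg hc] at hf
      rw [if_neg (fun h => hc ⟨h.1, h.2.1⟩)] at hb
      rcases h3 with ⟨hb0, ha0⟩ | ⟨hsel, _, _⟩
      · left; rw [hf, hb]; exact ⟨hb0, ha0⟩
      · right; rw [hf, hb]; exact hsel
  rcases hfin _ _ rfl rfl with ⟨hb0, hf0⟩ | hsel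
  · rw [hf0, hb0]
    rfl
  · have hh := head?_sorted2_rev (if sa.2 < (c.length : Int) - 1 ∧ PySem.List.pyGetD pc (-1) 0 ≠ 0 then
        sa.1 ++ [(sa.2, (c.length : Int) - 1, (c.length : Int) - 1 - sa.2)] else sa.1)
    rw [hsel] at hh
    rcases hss : PySem.List.sorted2 (if sa.2 < (c.length : Int) - 1 ∧ PySem.List.pyGetD pc (-1) 0 ≠ 0 then
        sa.1 ++ [(sa.2, (c.length : Int) - 1, (c.length : Int) - 1 - sa.2)] else sa.1)
        (fun x => x.2.2) (fun x => x.1) true with _ | ⟨p, rest⟩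
    · rw [hss] at hh; simp at hh
    · rw [hss] at hh
      simp at hh
      rw [hh]
      rfl
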